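-- pv_equiv track=rewrite | github.com/Kyeongrok/python_algorithm | test/03_matrix_row_sum.py | getMaxColumnSum
-- ===== SOURCE A (Python) =====
-- def getMaxColumnSum(matrix):
--     n = len(matrix)
--     memo = [0] * n
--
--     for j in range(n):
--         columnSum = 0
--         for i in range(n):
--             columnSum += matrix[i][j]
--         memo[j] = columnSum
--
--     return max(memo)
-- ===== SOURCE B (Python) =====
-- def getMaxColumnSum(matrix):
--     def addRows(a, b):
--         return [x + y for x, y in zip(a, b)]
--
--     def colSums(rows):
--         if not rows:
--             return [0] * len(matrix)
--         return addRows(rows[0], colSums(rows[1:]))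
--
--     return max(colSums(matrix))
-- ===== Notes on version B (the rewrite author's own statement) =====
-- stated objective: alternative
-- what changed: B replaces A's index-driven nested range loops with a structural recursion over the list of rows that combines rows by elementwise zip-addition (vector add), then takes the max; no index arithmetic at all.
import Mathlib
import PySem

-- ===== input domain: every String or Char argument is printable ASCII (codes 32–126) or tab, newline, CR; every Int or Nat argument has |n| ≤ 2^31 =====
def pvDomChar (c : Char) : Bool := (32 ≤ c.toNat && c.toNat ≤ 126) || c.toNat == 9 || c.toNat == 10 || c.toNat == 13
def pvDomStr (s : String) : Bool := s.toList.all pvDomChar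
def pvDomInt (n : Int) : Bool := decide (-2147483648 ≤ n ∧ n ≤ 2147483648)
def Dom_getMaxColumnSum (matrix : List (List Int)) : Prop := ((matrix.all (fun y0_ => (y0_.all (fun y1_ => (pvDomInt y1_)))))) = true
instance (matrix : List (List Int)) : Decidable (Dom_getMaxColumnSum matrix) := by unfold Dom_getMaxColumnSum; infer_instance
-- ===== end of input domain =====

-- B: structural recursion over rows combining them by elementwise zip-addition, then max;
-- A: index-driven nested range loops, column by column. Same O(n^2) cost, different decomposition.
-- Pre_ excludes exactly the inputs on which A raises (empty matrix, a row shorter than n).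


-- matrix[i][j], total with defaults; Pre_ keeps every access in range
def pvEnt (matrix : List (List Int)) (i j : Int) : Int :=
  PySem.List.pyGetD (PySem.List.pyGetD matrix i []) j 0

-- ===== PORT A =====
def getMaxColumnSum (matrix : List (List Int)) : Int :=
  let n : Int := matrix.length
  let memo : List Int :=
    (PySem.List.pyRange 0 n 1).map (fun j =>
      (PySem.List.pyRange 0 n 1).foldl (fun columnSum i => columnSum + pvEnt matrix i j) 0)
  (PySem.List.max? memo id).getD 0

-- ===== PORT B =====
-- addRows a b = [x + y for x, y in zip(a, b)]
def pvAddRows (a b : List Int) : List Int :=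
  (a.zip b).map (fun p => p.1 + p.2)

-- colSums rows: [0]*len(matrix) for [], else addRows(rows[0], colSums(rows[1:]))
def pvColSums (n : Nat) : List (List Int) → List Int
  | [] => List.replicate n 0
  | r :: rs => pvAddRows r (pvColSums n rs)

def getMaxColumnSum_alt (matrix : List (List Int)) : Int :=
  (PySem.List.max? (pvColSums matrix.length matrix) id).getD 0

-- ===== PRECONDITION & SPEC =====
-- Pre_ excludes the empty matrix (max([]) raises ValueError in A) and matrices with a row
-- shorter than len(matrix) (A raises IndexError on the missing column entry).
def Pre_getMaxColumnSum (matrix : List (List Int)) : Prop :=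
  matrix ≠ [] ∧ ∀ row ∈ matrix, matrix.length ≤ row.length
instance (matrix : List (List Int)) : Decidable (Pre_getMaxColumnSum matrix) := by
  unfold Pre_getMaxColumnSum; infer_instance
def pvWitness_getMaxColumnSum : List (List Int) := [[1, 2], [3, 4]]

def Spec_getMaxColumnSum (matrix : List (List Int)) (out : Int) : Prop := out = getMaxColumnSum_alt matrix
instance (matrix : List (List Int)) (out : Int) : Decidable (Spec_getMaxColumnSum matrix out) := by unfold Spec_getMaxColumnSum; infer_instance

-- ===== CLAIM (what is proved, stated in full; the proofs are below) =====
def Claim_equal_getMaxColumnSum : Prop := ∀ (matrix : List (List Int)), Dom_getMaxColumnSum matrix → Pre_getMaxColumnSum matrix → Spec_getMaxColumnSum matrix (getMaxColumnSum matrix)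

-- ===== LEMMAS AND PROOFS =====

-- the common shape both memo vectors are proved equal to: the j-th true column sum
def pvColVec (matrix : List (List Int)) (n : Nat) : List Int :=
  (List.range n).map (fun j => (matrix.map (fun row => row.getD j 0)).sum)

-- B's recursion yields the column-sum vector when every row has length ≥ n
lemma pv_colSums_eq (n : Nat) :
    ∀ rows : List (List Int), (∀ r ∈ rows, n ≤ r.length) →
      pvColSums n rows = pvColVec rows n := by
  intro rows
  induction rows with
  | nil =>
      intro _
      apply List.ext_getElem <;> simp [pvColSums, pvColVec]
  | cons r rs ih =>
      intro h
      have hr : n ≤ r.length := h r (by simp)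
      have hrest := ih (fun x hx => h x (by simp [hx]))
      simp only [pvColSums, hrest, pvAddRows, pvColVec]
      apply List.ext_getElem
      · simp; omega
      · intro i h1 h2
        simp only [List.length_map, List.length_zip, List.length_range, lt_min_iff] at h1
        simp only [List.getElem_map, List.getElem_zip, List.getElem_range, List.map_cons,
          List.sum_cons]
        rw [List.getD_eq_getElem?_getD, List.getElem?_eq_getElem (by omega : i < r.length)]
        simp

-- A's inner fold over row indices is the j-th column sum
lemma pv_fold_eq (matrix : List (List Int)) (j : Nat) :
    ∀ r : Nat, r ≤ matrix.length →
      (List.map (Nat.cast : Nat → Int) (List.range r)).foldl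
          (fun columnSum i => columnSum + pvEnt matrix i ((j : Nat) : Int)) 0
        = ((matrix.take r).map (fun row => row.getD j 0)).sum := by
  intro r
  induction r with
  | zero => intro _; simp
  | succ r ih =>
      intro hr
      rw [List.range_succ, List.map_append, List.foldl_append, ih (by omega)]
      have hrlt : r < matrix.length := by omega
      simp only [List.map_cons, List.map_nil, List.foldl_cons, List.foldl_nil]
      rw [List.take_add_one, List.getElem?_eq_getElem hrlt]
      simp only [Option.toList_some, List.map_append, List.map_cons, List.map_nil,
        List.sum_append, List.sum_cons, List.sum_nil]
      have : pvEnt matrix (r : Int) ((j : Nat) : Int) = matrix[r].getD j 0 := by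
        simp [pvEnt, List.getD_eq_getElem?_getD, List.getElem?_eq_getElem hrlt]
      rw [this]; ring

-- A's memo is the column-sum vector
lemma pv_memoA_eq (matrix : List (List Int)) :
    (PySem.List.pyRange 0 (matrix.length : Int) 1).map (fun j =>
        (PySem.List.pyRange 0 (matrix.length : Int) 1).foldl
          (fun columnSum i => columnSum + pvEnt matrix i j) 0)
      = pvColVec matrix matrix.length := by
  rw [PySem.List.pyRange_zero_nat, List.map_map]
  unfold pvColVec
  apply List.map_congr_left
  intro j hj
  simp only [Function.comp_apply]
  rw [pv_fold_eq matrix j matrix.length (le_refl _), List.take_length]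

-- ===== VERDICT (by name: the statement is the Claim_ definition above) =====
theorem getMaxColumnSum_spec : Claim_equal_getMaxColumnSum := by
  intro matrix _ hpre
  unfold Spec_getMaxColumnSum getMaxColumnSum getMaxColumnSum_alt
  dsimp only
  rw [pv_memoA_eq matrix, pv_colSums_eq matrix.length matrix hpre.2]
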